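-- pv_equiv track=rewrite | github.com/chrisjunlee/practice | topcoder/ABC.py | changify
-- ===== SOURCE A (Python) =====
-- def changify(max_splits, denom, amount):
--     splits = [None for i in range(max_splits)]
--     remainder = amount
--     for i in range(max_splits):
--         if remainder >= denom:
--             splits[i] = denom
--             remainder -= denom
--         elif remainder > 0:
--             splits[i] = remainder
--             remainder = 0
--             break
--
--     while splits and splits[-1] is None:
--         splits.pop()
--     splits.reverse()
--     return (splits, remainder)
-- ===== SOURCE B (Python) =====
-- def changify(max_splits, denom, amount):
--     # closed form: one divmod gives the chunk count; the list is built directly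
--     if denom <= 0 or amount <= 0 or max_splits <= 0:
--         return ([], amount)
--     q, r = divmod(amount, denom)
--     if q >= max_splits:
--         return ([denom] * max_splits, amount - max_splits * denom)
--     if r:
--         return ([r] + [denom] * q, 0)
--     return ([denom] * q, 0)
-- ===== Notes on version B (the rewrite author's own statement) =====
-- stated objective: faster
-- what changed: Replaces the per-chunk subtraction loop over range(max_splits) (plus the trailing-None pop pass and reverse) with a closed form: one divmod gives the chunk count and remainder chunk, and the result list is built directly in final order.
-- intended difference: When max_splits > 0, denom <= 0 and amount >= denom, A's loop condition 'remainder >= denom' never stops holding, so A returns max_splits chunks of the non-positive denom (e.g. ([0, 0], 5)); B returns ([], amount), the intended no-op for a non-positive denomination. — e.g. on changify(2, 0, 5): A returns ([0, 0], 5), B returns ([], 5)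
import Mathlib
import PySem

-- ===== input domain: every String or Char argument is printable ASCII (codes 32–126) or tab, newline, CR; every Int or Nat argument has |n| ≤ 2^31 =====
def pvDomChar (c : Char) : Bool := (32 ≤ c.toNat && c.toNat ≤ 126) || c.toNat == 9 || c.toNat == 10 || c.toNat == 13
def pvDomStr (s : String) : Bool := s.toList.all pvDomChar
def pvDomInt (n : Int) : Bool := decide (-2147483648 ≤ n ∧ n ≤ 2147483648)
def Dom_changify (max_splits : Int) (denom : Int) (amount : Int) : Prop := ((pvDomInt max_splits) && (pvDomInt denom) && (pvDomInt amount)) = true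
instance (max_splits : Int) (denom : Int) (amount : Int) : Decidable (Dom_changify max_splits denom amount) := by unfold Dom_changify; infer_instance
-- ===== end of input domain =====

-- B replaces A's per-chunk subtraction loop by a divmod closed form (faster: O(output) vs O(max_splits));
-- on non-positive denom with max_splits > 0 and amount ≥ denom, A's value differs from B's (see D_ below).

-- ===== PORT A =====
-- A's for-loop over range(max_splits): each iteration either writes denom and continues,
-- writes the remainder and breaks (the rest of the list stays None), or leaves None and continues
def changifyLoopA (n : Nat) (denom : Int) (remainder : Int) : List (Option Int) × Int :=
  match n with
  | 0 => ([], remainder)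
  | Nat.succ m =>
    if remainder ≥ denom then
      let p := changifyLoopA m denom (remainder - denom)
      (some denom :: p.1, p.2)
    else if remainder > 0 then
      (some remainder :: List.replicate m none, 0)
    else
      let p := changifyLoopA m denom remainder
      (none :: p.1, p.2)

-- 'while splits and splits[-1] is None: splits.pop()'
def changifyPop : List (Option Int) → List (Option Int)
  | [] => []
  | x :: xs =>
    match changifyPop xs, x with
    | [], none => []
    | r, x => x :: r

def changify (max_splits : Int) (denom : Int) (amount : Int) : List Int × Int :=
  match changifyLoopA max_splits.toNat denom amount with
  | (splits, remainder) =>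
    -- after popping trailing Nones no None remains, so filterMap id just strips 'some'
    (((changifyPop splits).reverse).filterMap id, remainder)

-- ===== PORT B =====
def changify_alt (max_splits : Int) (denom : Int) (amount : Int) : List Int × Int :=
  if denom ≤ 0 ∨ amount ≤ 0 ∨ max_splits ≤ 0 then ([], amount)
  else
    let q := PySem.Int.floordiv amount denom  -- q, r = divmod(amount, denom)
    let r := PySem.Int.mod amount denom
    if q ≥ max_splits then (List.replicate max_splits.toNat denom, amount - max_splits * denom)
    else if r ≠ 0 then (r :: List.replicate q.toNat denom, 0)
    else (List.replicate q.toNat denom, 0)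

-- ===== PRECONDITION & SPEC =====
-- When max_splits > 0, denom <= 0 and amount >= denom, A's loop condition 'remainder >= denom'
-- never stops holding, so A returns max_splits chunks of the non-positive denom; B returns
-- ([], amount), the intended no-op for a non-positive denomination.
def D_changify (max_splits : Int) (denom : Int) (amount : Int) : Prop :=
  0 < max_splits ∧ denom ≤ 0 ∧ denom ≤ amount
instance (max_splits : Int) (denom : Int) (amount : Int) : Decidable (D_changify max_splits denom amount) := by unfold D_changify; infer_instance

def Spec_changify (max_splits : Int) (denom : Int) (amount : Int) (out : List Int × Int) : Prop := ¬ D_changify max_splits denom amount → out = changify_alt max_splits denom amount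
instance (max_splits : Int) (denom : Int) (amount : Int) (out : List Int × Int) : Decidable (Spec_changify max_splits denom amount out) := by unfold Spec_changify; infer_instance

def pvDiffWitness_changify : Int × Int × Int := (2, 0, 5)
def pvDiffWitnessOut_changify : (List Int × Int) × (List Int × Int) := (([0, 0], 5), ([], 5))

-- ===== CLAIM (what is proved, stated in full; the proofs are below) =====
def Claim_unchanged_changify : Prop := ∀ (max_splits : Int) (denom : Int) (amount : Int), Dom_changify max_splits denom amount → Spec_changify max_splits denom amount (changify max_splits denom amount)
def Claim_changed_changify : Prop := Dom_changify (pvDiffWitness_changify.1) (pvDiffWitness_changify.2.1) (pvDiffWitness_changify.2.2) ∧ D_changify (pvDiffWitness_changify.1) (pvDiffWitness_changify.2.1) (pvDiffWitness_changify.2.2) ∧ changify (pvDiffWitness_changify.1) (pvDiffWitness_changify.2.1) (pvDiffWitness_changify.2.2) = pvDiffWitnessOut_changify.1 ∧ changify_alt (pvDiffWitness_changify.1) (pvDiffWitness_changify.2.1) (pvDiffWitness_changify.2.2) = pvDiffWitnessOut_changify.2 ∧ pvDiffWitnessOut_changify.1 ≠ pvDiffWitnessOut_changify.2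
def Claim_exact_changify : Prop := ∀ (max_splits : Int) (denom : Int) (amount : Int), Dom_changify max_splits denom amount → D_changify max_splits denom amount → changify max_splits denom amount ≠ changify_alt max_splits denom amount

-- ===== LEMMAS AND PROOFS =====

theorem loopA_nonpos_denom_ge (n : Nat) (denom remainder : Int) (hd : denom ≤ 0)
    (hr : remainder ≥ denom) :
    changifyLoopA n denom remainder = (List.replicate n (some denom), remainder - n * denom) := by
  induction n generalizing remainder with
  | zero => simp [changifyLoopA]
  | succ m ih =>
    simp only [changifyLoopA, if_pos hr]
    rw [ih (remainder - denom) (by omega)]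
    simp [List.replicate_succ]
    ring

theorem loopA_dead (n : Nat) (denom remainder : Int)
    (h1 : ¬ remainder ≥ denom) (h2 : ¬ remainder > 0) :
    changifyLoopA n denom remainder = (List.replicate n none, remainder) := by
  induction n with
  | zero => simp [changifyLoopA]
  | succ m ih =>
    simp only [changifyLoopA, if_neg h1, if_neg h2]
    rw [ih]
    simp [List.replicate_succ]

theorem loopA_pos (n : Nat) (denom remainder : Int) (hd : 0 < denom) (hr : 0 < remainder) :
    changifyLoopA n denom remainder =
      if (n : Int) ≤ remainder / denom then
        (List.replicate n (some denom), remainder - n * denom)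
      else if remainder % denom > 0 then
        (List.replicate (remainder / denom).toNat (some denom) ++
           some (remainder % denom) :: List.replicate (n - (remainder / denom).toNat - 1) none, 0)
      else
        (List.replicate (remainder / denom).toNat (some denom) ++
           List.replicate (n - (remainder / denom).toNat) none, 0) := by
  induction n generalizing remainder with
  | zero =>
    have : (0 : Int) ≤ remainder / denom := Int.ediv_nonneg (by omega) (by omega)
    simp [changifyLoopA, this]
  | succ m ih =>
    by_cases hge : remainder ≥ denom
    · -- take a denom chunk
      have hq1 : 1 ≤ remainder / denom := by
        rw [Int.le_ediv_iff_mul_le hd]; omega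
      by_cases hz : remainder - denom > 0
      · have hdiv : (remainder - denom) / denom = remainder / denom - 1 := by
          have h := Int.add_mul_ediv_right remainder (-1) (by omega : denom ≠ 0)
          have e : remainder + -1 * denom = remainder - denom := by ring
          rw [e] at h; omega
        have hmod : (remainder - denom) % denom = remainder % denom :=
          Int.sub_emod_right remainder denom
        simp only [changifyLoopA, if_pos hge]
        rw [ih (remainder - denom) hz, hdiv, hmod]
        generalize hQ : remainder / denom = Q at hq1 ⊢
        generalize hR : remainder % denom = R
        by_cases hc : (m : Int) ≤ Q - 1
        · rw [if_pos hc, if_pos (show ((m + 1 : Nat) : Int) ≤ Q by push_cast; omega)]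
          simp [List.replicate_succ]
          ring
        · rw [if_neg hc, if_neg (show ¬ ((m + 1 : Nat) : Int) ≤ Q by push_cast; omega)]
          have htn : (Q - 1).toNat = Q.toNat - 1 := by omega
          rw [htn]
          by_cases hm : R > 0
          · rw [if_pos hm, if_pos hm]
            simp only [Prod.mk.injEq, and_true]
            rw [show m - (Q.toNat - 1) - 1 = m + 1 - Q.toNat - 1 by omega,
              ← List.cons_append, ← List.replicate_succ,
              show Q.toNat - 1 + 1 = Q.toNat by omega]
          · rw [if_neg hm, if_neg hm]
            simp only [Prod.mk.injEq, and_true]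
            rw [show m - (Q.toNat - 1) = m + 1 - Q.toNat by omega,
              ← List.cons_append, ← List.replicate_succ,
              show Q.toNat - 1 + 1 = Q.toNat by omega]
      · -- remainder = denom exactly: one chunk, then the loop writes nothing more
        have hrd : remainder = denom := by omega
        have hq : remainder / denom = 1 := by rw [hrd]; exact Int.ediv_self (by omega)
        have hm : remainder % denom = 0 := by rw [hrd, Int.emod_self]
        simp only [changifyLoopA, if_pos hge]
        rw [loopA_dead m denom (remainder - denom) (by omega) (by omega)]
        rw [hq, hm]
        by_cases hc : ((m + 1 : Nat) : Int) ≤ 1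
        · have hm0 : m = 0 := by omega
          subst hm0
          rw [if_pos hc]
          simp [hrd]
        · rw [if_neg hc]
          simp only [gt_iff_lt, lt_irrefl, if_false, Int.toNat_one]
          simp [List.replicate_succ]
          omega
    · -- remainder < denom, remainder > 0 : the break branch
      have hq : remainder / denom = 0 := Int.ediv_eq_zero_of_lt (by omega) (by omega)
      have hm : remainder % denom = remainder := Int.emod_eq_of_lt (by omega) (by omega)
      simp only [changifyLoopA, if_neg hge, if_pos hr]
      rw [hq, hm]
      rw [if_neg (show ¬ ((m + 1 : Nat) : Int) ≤ 0 by push_cast; omega), if_pos hr]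
      simp

theorem pop_all_some (l : List Int) (f : Int → Option Int) (h : ∀ x, (f x).isSome) :
    changifyPop (l.map f) = l.map f := by
  induction l with
  | nil => rfl
  | cons x xs ih =>
    simp only [List.map_cons, changifyPop, ih]
    cases hxs : xs.map f with
    | nil =>
      cases hfx : f x with
      | none => exact absurd (hfx ▸ h x) (by simp)
      | some v => simp
    | cons y ys => simp

theorem pop_replicate_some (n : Nat) (d : Int) :
    changifyPop (List.replicate n (some d)) = List.replicate n (some d) := by
  have := pop_all_some (List.replicate n d) some (by simp)
  simpa using this

theorem pop_append_none (l : List (Option Int)) (k : Nat) :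
    changifyPop (l ++ List.replicate k none) = changifyPop l := by
  induction l with
  | nil =>
    induction k with
    | zero => rfl
    | succ m ihk =>
      simp only [List.nil_append] at ihk ⊢
      simp [List.replicate_succ, changifyPop, ihk]
  | cons x xs ih => simp [changifyPop, ih]

theorem pop_replicate_none (k : Nat) :
    changifyPop (List.replicate k none) = [] := by
  have := pop_append_none [] k
  simpa using this

theorem pop_some_cons_none (q : Nat) (d r : Int) (k : Nat) :
    changifyPop (List.replicate q (some d) ++ some r :: List.replicate k none) =
      List.replicate q (some d) ++ [some r] := by
  have h1 : List.replicate q (some d) ++ some r :: List.replicate k none =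
      (List.replicate q (some d) ++ [some r]) ++ List.replicate k none := by simp
  rw [h1, pop_append_none]
  have h2 : List.replicate q (some d) ++ [some r] =
      (List.replicate q d ++ [r]).map some := by simp
  rw [h2, pop_all_some _ some (by simp)]

theorem filterMap_replicate_some (n : Nat) (d : Int) :
    (List.replicate n (some d)).filterMap id = List.replicate n d := by
  induction n with
  | zero => rfl
  | succ m ih => simp [List.replicate_succ]

-- A's value on the D_ region: max_splits copies of denom
theorem changify_on_D (max_splits denom amount : Int)
    (h : D_changify max_splits denom amount) :
    changify max_splits denom amount =
      (List.replicate max_splits.toNat denom, amount - max_splits.toNat * denom) := by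
  obtain ⟨hms, hd, ha⟩ := h
  unfold changify
  rw [loopA_nonpos_denom_ge _ _ _ hd ha]
  simp only
  rw [pop_replicate_some, List.reverse_replicate, filterMap_replicate_some]

-- ===== VERDICT (by name: the statement is the Claim_ definition above) =====
theorem changify_spec : Claim_unchanged_changify := by
  intro max_splits denom amount _
  intro hnd
  unfold changify changify_alt
  by_cases hms : max_splits ≤ 0
  · have h0 : max_splits.toNat = 0 := by omega
    rw [if_pos (by tauto), h0]
    simp [changifyLoopA, changifyPop]
  · have hcast : (max_splits.toNat : Int) = max_splits := by omega
    by_cases hd : denom ≤ 0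
    · -- ¬D with max_splits > 0 and denom ≤ 0 forces amount < denom
      have ha : ¬ amount ≥ denom := by
        intro hge; exact hnd ⟨by omega, hd, hge⟩
      rw [if_pos (Or.inl hd), loopA_dead _ _ _ (by omega) (by omega)]
      simp only
      rw [pop_replicate_none]
      simp
    · by_cases ha : amount ≤ 0
      · rw [if_pos (Or.inr (Or.inl ha)), loopA_dead _ _ _ (by omega) (by omega)]
        simp only
        rw [pop_replicate_none]
        simp
      · rw [if_neg (by push Not; refine ⟨by omega, by omega, by omega⟩)]
        have hfd : PySem.Int.floordiv amount denom = amount / denom :=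
          PySem.Int.floordiv_eq_ediv_of_pos (by omega)
        have hmd : PySem.Int.mod amount denom = amount % denom :=
          PySem.Int.mod_eq_emod_of_pos (by omega)
        simp only [hfd, hmd]
        rw [loopA_pos _ _ _ (by omega) (by omega)]
        generalize hQ : amount / denom = Q
        generalize hR : amount % denom = R
        have hRnn : 0 ≤ R := by rw [← hR]; exact Int.emod_nonneg _ (by omega)
        by_cases hq : (max_splits.toNat : Int) ≤ Q
        · rw [if_pos hq, if_pos (show Q ≥ max_splits by omega)]
          simp only
          rw [pop_replicate_some, List.reverse_replicate, filterMap_replicate_some, hcast]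
        · rw [if_neg hq, if_neg (show ¬ Q ≥ max_splits by omega)]
          by_cases hr : R > 0
          · rw [if_pos hr, if_pos (show R ≠ 0 by omega)]
            simp only
            rw [pop_some_cons_none]
            simp
          · rw [if_neg hr, if_neg (show ¬ R ≠ 0 by omega)]
            simp only
            rw [pop_append_none, pop_replicate_some, List.reverse_replicate,
              filterMap_replicate_some]

theorem changify_changed : Claim_changed_changify := by
  unfold Claim_changed_changify; decide

theorem changify_tight : Claim_exact_changify := by
  intro max_splits denom amount _ hD
  rw [changify_on_D _ _ _ hD]
  obtain ⟨hms, hd, ha⟩ := hD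
  unfold changify_alt
  rw [if_pos (Or.inl hd)]
  intro hcontra
  have h1 : List.replicate max_splits.toNat denom = ([] : List Int) :=
    congrArg Prod.fst hcontra
  have : max_splits.toNat = 0 := by simpa using h1
  omega
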